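-- pv_equiv track=rewrite | github.com/simsapa/simsapa | simsapa/layouts/sutta_queries.py | dhp_verse_to_chapter
-- ===== SOURCE A (Python) =====
-- from typing import List, Optional
--
-- def dhp_verse_to_chapter(verse_num: int) -> Optional[str]:
--     chapters = [
--         [1, 20],
--         [21, 32],
--         [33, 43],
--         [44, 59],
--         [44, 59],
--         [60, 75],
--         [60, 75],
--         [76, 89],
--         [100, 115],
--         [116, 128],
--         [129, 145],
--         [146, 156],
--         [157, 166],
--         [167, 178],
--         [179, 196],
--         [197, 208],
--         [209, 220],
--         [221, 234],
--         [235, 255],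
--         [256, 272],
--         [273, 289],
--         [290, 305],
--         [306, 319],
--         [320, 333],
--         [334, 359],
--         [360, 382],
--         [383, 423],
--     ]
--
--     for lim in chapters:
--         a = lim[0]
--         b = lim[1]
--         if verse_num >= a and verse_num <= b:
--             return f"dhp{a}-{b}"
--
--     return None
-- ===== SOURCE B (Python) =====
-- from typing import Optional
--
-- # Deduplicated chapter boundaries, sorted by start (A's list repeats two ranges).
-- _STARTS = [1, 21, 33, 44, 60, 76, 100, 116, 129, 146, 157, 167, 179,
--            197, 209, 221, 235, 256, 273, 290, 306, 320, 334, 360, 383]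
-- _ENDS = [20, 32, 43, 59, 75, 89, 115, 128, 145, 156, 166, 178, 196,
--          208, 220, 234, 255, 272, 289, 305, 319, 333, 359, 382, 423]
--
-- def _bisect_right(xs, x, lo, hi):
--     # index of the first element of xs (sorted) strictly greater than x
--     while lo < hi:
--         mid = (lo + hi) // 2
--         if x < xs[mid]:
--             hi = mid
--         else:
--             lo = mid + 1
--     return lo
--
-- def dhp_verse_to_chapter(verse_num: int) -> Optional[str]:
--     i = _bisect_right(_STARTS, verse_num, 0, len(_STARTS)) - 1
--     if i >= 0 and verse_num <= _ENDS[i]: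
--         return f"dhp{_STARTS[i]}-{_ENDS[i]}"
--     return None
-- ===== Notes on version B (the rewrite author's own statement) =====
-- stated objective: alternative
-- what changed: B replaces A's per-call linear scan over the list of range pairs by a hand-rolled bisect_right binary search over the deduplicated sorted list of chapter starts, then a single end-bound check.
import Mathlib
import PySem

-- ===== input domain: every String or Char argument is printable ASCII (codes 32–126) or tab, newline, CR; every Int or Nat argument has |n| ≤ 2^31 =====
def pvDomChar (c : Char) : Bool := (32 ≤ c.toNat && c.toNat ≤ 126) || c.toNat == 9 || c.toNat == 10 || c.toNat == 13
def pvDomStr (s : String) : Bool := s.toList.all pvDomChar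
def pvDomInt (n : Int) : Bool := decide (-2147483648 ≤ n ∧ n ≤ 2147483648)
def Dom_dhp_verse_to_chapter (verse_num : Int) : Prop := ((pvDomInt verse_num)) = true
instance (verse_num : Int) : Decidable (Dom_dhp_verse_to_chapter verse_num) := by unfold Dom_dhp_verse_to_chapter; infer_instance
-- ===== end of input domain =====

-- B replaces A's per-call linear scan over the chapter ranges by a binary search
-- (bisect_right) on the deduplicated sorted list of chapter starts (alternative algorithm).

-- ===== PORT A =====
def dhpChaptersA : List (Int × Int) :=
  [(1, 20), (21, 32), (33, 43), (44, 59), (44, 59), (60, 75), (60, 75),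
   (76, 89), (100, 115), (116, 128), (129, 145), (146, 156), (157, 166),
   (167, 178), (179, 196), (197, 208), (209, 220), (221, 234), (235, 255),
   (256, 272), (273, 289), (290, 305), (306, 319), (320, 333), (334, 359),
   (360, 382), (383, 423)]

-- the 'for lim in chapters: … return …' loop; the early return stops the recursion
def dhpLoopA : List (Int × Int) → Int → Option String
  | [], _ => none
  | lim :: rest, verse_num =>
    if verse_num ≥ lim.1 ∧ verse_num ≤ lim.2 then
      some ("dhp" ++ PySem.Int.toStr lim.1 ++ "-" ++ PySem.Int.toStr lim.2)
    else dhpLoopA rest verse_num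

def dhp_verse_to_chapter (verse_num : Int) : Option String :=
  dhpLoopA dhpChaptersA verse_num

-- ===== PORT B =====
def dhpStarts : List Int :=
  [1, 21, 33, 44, 60, 76, 100, 116, 129, 146, 157, 167, 179,
   197, 209, 221, 235, 256, 273, 290, 306, 320, 334, 360, 383]

def dhpEnds : List Int :=
  [20, 32, 43, 59, 75, 89, 115, 128, 145, 156, 166, 178, 196,
   208, 220, 234, 255, 272, 289, 305, 319, 333, 359, 382, 423]

-- the 'while lo < hi' loop of _bisect_right; the fuel argument only makes the
-- recursion structural (each iteration shrinks hi - lo, so (hi - lo).toNat fuel suffices);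
-- xs[mid] is always in range here, so pyGetD's default 0 is never read
def dhpBisect (xs : List Int) (x : Int) : Nat → Int → Int → Int
  | 0, lo, _ => lo
  | fuel + 1, lo, hi =>
    if lo < hi then
      let mid := PySem.Int.floordiv (lo + hi) 2
      if x < PySem.List.pyGetD xs mid 0 then dhpBisect xs x fuel lo mid
      else dhpBisect xs x fuel (mid + 1) hi
    else lo

def dhp_verse_to_chapter_alt (verse_num : Int) : Option String :=
  let n : Int := dhpStarts.length
  let i := dhpBisect dhpStarts verse_num (n - 0).toNat 0 n - 1
  if i ≥ 0 ∧ verse_num ≤ PySem.List.pyGetD dhpEnds i 0 then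
    some ("dhp" ++ PySem.Int.toStr (PySem.List.pyGetD dhpStarts i 0) ++ "-" ++
          PySem.Int.toStr (PySem.List.pyGetD dhpEnds i 0))
  else none

-- ===== PRECONDITION & SPEC =====
def Spec_dhp_verse_to_chapter (verse_num : Int) (out : Option String) : Prop := out = dhp_verse_to_chapter_alt verse_num
instance (verse_num : Int) (out : Option String) : Decidable (Spec_dhp_verse_to_chapter verse_num out) := by unfold Spec_dhp_verse_to_chapter; infer_instance

-- ===== CLAIM (what is proved, stated in full; the proofs are below) =====
def Claim_equal_dhp_verse_to_chapter : Prop := ∀ (verse_num : Int), Dom_dhp_verse_to_chapter verse_num → Spec_dhp_verse_to_chapter verse_num (dhp_verse_to_chapter verse_num)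

-- ===== LEMMAS AND PROOFS =====

-- if x is below every element, the search always moves hi down and returns lo
theorem dhpBisect_all_lt (xs : List Int) (x : Int) (hall : ∀ e ∈ xs, x < e) :
    ∀ (fuel : Nat) (lo hi : Int), 0 ≤ lo → hi ≤ (xs.length : Int) →
      (hi - lo).toNat ≤ fuel → dhpBisect xs x fuel lo hi = lo := by
  intro fuel
  induction fuel with
  | zero => intro lo hi _ _ hf; rfl
  | succ fuel ih =>
    intro lo hi hlo hhi hf
    unfold dhpBisect
    split
    · next h =>
      have hmid := PySem.Int.floordiv_two_mid_bounds (le_of_lt h)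
      have hmlt : PySem.Int.floordiv (lo + hi) 2 < hi :=
        (PySem.Int.floordiv_lt_iff_lt_mul (by norm_num)).mpr (by omega)
      have hget : PySem.List.pyGetD xs (PySem.Int.floordiv (lo + hi) 2) 0 ∈ xs :=
        PySem.List.pyGetD_mem xs 0 (by unfold PySem.Raise.InRange; omega)
      rw [if_pos (hall _ hget)]
      exact ih lo _ hlo (by omega) (by omega)
    · rfl

-- if x is at or above every element, the search always moves lo up and returns hi
theorem dhpBisect_all_ge (xs : List Int) (x : Int) (hall : ∀ e ∈ xs, e ≤ x) :
    ∀ (fuel : Nat) (lo hi : Int), 0 ≤ lo → lo ≤ hi → hi ≤ (xs.length : Int) →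
      (hi - lo).toNat ≤ fuel → dhpBisect xs x fuel lo hi = hi := by
  intro fuel
  induction fuel with
  | zero => intro lo hi _ hlh _ hf; unfold dhpBisect; omega
  | succ fuel ih =>
    intro lo hi hlo hlh hhi hf
    unfold dhpBisect
    split
    · next h =>
      have hmid := PySem.Int.floordiv_two_mid_bounds (le_of_lt h)
      have hmlt : PySem.Int.floordiv (lo + hi) 2 < hi :=
        (PySem.Int.floordiv_lt_iff_lt_mul (by norm_num)).mpr (by omega)
      have hget : PySem.List.pyGetD xs (PySem.Int.floordiv (lo + hi) 2) 0 ∈ xs :=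
        PySem.List.pyGetD_mem xs 0 (by unfold PySem.Raise.InRange; omega)
      rw [if_neg (not_lt.mpr (hall _ hget))]
      exact ih _ hi (by omega) (by omega) hhi (by omega)
    · next h => omega

-- the two programs agree on every verse number in 1..423 (checked by evaluation)
set_option maxRecDepth 20000 in
set_option maxHeartbeats 2000000 in
theorem agree_inrange :
    ∀ n ∈ List.range 423, dhp_verse_to_chapter ((n : Int) + 1) = dhp_verse_to_chapter_alt ((n : Int) + 1) := by
  decide

theorem dhpLoopA_none (v : Int) :
    ∀ rs : List (Int × Int), (∀ p ∈ rs, ¬(v ≥ p.1 ∧ v ≤ p.2)) → dhpLoopA rs v = none := by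
  intro rs
  induction rs with
  | nil => intro; rfl
  | cons q rs ih =>
    intro h
    unfold dhpLoopA
    rw [if_neg (h q (by simp))]
    exact ih fun p hp => h p (by simp [hp])

theorem A_none_out (v : Int) (hv : v < 1 ∨ 423 < v) : dhp_verse_to_chapter v = none := by
  apply dhpLoopA_none
  intro p hp
  fin_cases hp <;> simp <;> omega

theorem B_none_low (v : Int) (hv : v < 1) : dhp_verse_to_chapter_alt v = none := by
  have hall : ∀ e ∈ dhpStarts, v < e := by intro e he; fin_cases he <;> omega
  have h := dhpBisect_all_lt dhpStarts v hall (((dhpStarts.length : Int) - 0).toNat) 0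
      (dhpStarts.length : Int) (by omega) (by omega) (le_refl _)
  simp only [dhp_verse_to_chapter_alt]
  rw [h]
  norm_num

theorem B_none_high (v : Int) (hv : 423 < v) : dhp_verse_to_chapter_alt v = none := by
  have hall : ∀ e ∈ dhpStarts, e ≤ v := by intro e he; fin_cases he <;> omega
  have h := dhpBisect_all_ge dhpStarts v hall (((dhpStarts.length : Int) - 0).toNat) 0
      (dhpStarts.length : Int) (by omega) (by decide) (by omega) (le_refl _)
  simp only [dhp_verse_to_chapter_alt]
  rw [h]
  rw [show PySem.List.pyGetD dhpEnds ((dhpStarts.length : Int) - 1) 0 = 423 from by decide]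
  rw [if_neg (by omega)]

-- ===== VERDICT (by name: the statement is the Claim_ definition above) =====
theorem dhp_verse_to_chapter_spec : Claim_equal_dhp_verse_to_chapter := by
  intro v _
  unfold Spec_dhp_verse_to_chapter
  by_cases h1 : 1 ≤ v ∧ v ≤ 423
  · have hn : v = ((v - 1).toNat : Int) + 1 := by omega
    rw [hn]
    exact agree_inrange (v - 1).toNat (by rw [List.mem_range]; omega)
  · have hv : v < 1 ∨ 423 < v := by omega
    rw [A_none_out v hv]
    rcases hv with h | h
    · exact (B_none_low v h).symm
    · exact (B_none_high v h).symm
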